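-- pv_equiv track=rewrite | github.com/zelaifeng-lab/fourier-transform-flutter | backend/backend.py | _convert_frac_calls
-- ===== SOURCE A (Python) =====
-- def _convert_frac_calls(s: str) -> str:
--     # Replace FRAC(a,b) -> ((a)/(b)) with nesting support
--     out = []
--     i = 0
--     while i < len(s):
--         if s.startswith("FRAC(", i):
--             i += 5
--             depth = 1
--             args = []
--             cur = []
--             while i < len(s) and depth > 0:
--                 ch = s[i]
--                 if ch == "(":
--                     depth += 1
--                     cur.append(ch)
--                 elif ch == ")":
--                     depth -= 1
--                     if depth == 0:
--                         args.append("".join(cur).strip())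
--                         cur = []
--                         i += 1
--                         break
--                     cur.append(ch)
--                 elif ch == "," and depth == 1:
--                     args.append("".join(cur).strip())
--                     cur = []
--                 else:
--                     cur.append(ch)
--                 i += 1
--             if len(args) == 2:
--                 out.append(f"(({args[0]})/({args[1]}))")
--             else:
--                 out.append("FRAC(" + ",".join(args) + ")")
--         else:
--             out.append(s[i])
--             i += 1
--     return "".join(out)
-- ===== SOURCE B (Python) =====
-- def _find_close(s, start):
--     # Index of the ')' closing the group opened just before `start`; None if absent.
--     depth = 0
--     for j in range(start, len(s)):
--         c = s[j]
--         if c == ')':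
--             if depth == 0:
--                 return j
--             depth -= 1
--         elif c == '(':
--             depth += 1
--     return None
--
--
-- def _split_top(t):
--     # Split t at top-level (depth-0) commas.
--     pieces = []
--     start = 0
--     depth = 0
--     for j, c in enumerate(t):
--         if c == ',' and depth == 0:
--             pieces.append(t[start:j])
--             start = j + 1
--         elif c == '(':
--             depth += 1
--         elif c == ')':
--             depth = max(depth - 1, 0)
--     pieces.append(t[start:])
--     return pieces
--
--
-- def _convert_frac_calls(s: str) -> str:
--     out = []
--     i = 0
--     while i < len(s):
--         if s.startswith("FRAC(", i):
--             close = _find_close(s, i + 5)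
--             if close is None:
--                 # no matching ')': not a complete call, keep the text literally
--                 out.append("FRAC(")
--                 i += 5
--             else:
--                 args = [p.strip() for p in _split_top(s[i + 5:close])]
--                 if len(args) == 2:
--                     out.append("(({})/({}))".format(args[0], args[1]))
--                 else:
--                     out.append("FRAC(" + ",".join(args) + ")")
--                 i = close + 1
--         else:
--             out.append(s[i])
--             i += 1
--     return "".join(out)
-- ===== Notes on version B (the rewrite author's own statement) =====
-- stated objective: alternative
-- what changed: Replaces A's single character-at-a-time state machine (mutable depth/args/cur inside the scan loop) by a two-phase parser: a helper locates the matching close paren by depth tracking, a second depth-aware pass splits the inner text at top-level commas, and a formatter emits the result.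
-- intended difference: On inputs containing a FRAC( occurrence with no matching close paren, A silently drops the unfinished argument text (everything after the last top-level comma) and still emits a closed FRAC call, while B keeps the incomplete FRAC( and the following text literally, which is the intended treatment of malformed input. — e.g. on _convert_frac_calls("FRAC("): A returns "FRAC()", B returns "FRAC("
import Mathlib
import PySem

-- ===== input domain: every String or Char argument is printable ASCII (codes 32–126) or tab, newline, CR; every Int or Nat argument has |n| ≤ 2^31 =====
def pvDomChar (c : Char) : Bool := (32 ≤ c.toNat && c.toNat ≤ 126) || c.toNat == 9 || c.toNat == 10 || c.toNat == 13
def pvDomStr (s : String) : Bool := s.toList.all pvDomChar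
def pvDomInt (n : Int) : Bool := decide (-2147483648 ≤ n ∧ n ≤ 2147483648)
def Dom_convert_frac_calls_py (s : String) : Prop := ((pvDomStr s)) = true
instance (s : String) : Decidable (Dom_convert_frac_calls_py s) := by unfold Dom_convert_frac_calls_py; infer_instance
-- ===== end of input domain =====

-- B rewrites A's one-pass character state machine as a two-phase parser (find the matching
-- close paren, then split at top-level commas); on an unterminated FRAC( A returns a value
-- that drops trailing text, B keeps the text literally — stated as the intended difference D_.

-- ===== PORT A =====
-- inner while loop of A: state = (remaining input, depth, args, cur); returns (args, rest)
def pvLoopA : List Char → Nat → List (List Char) → List Char → (List (List Char) × List Char)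
  | [], _, args, _ => (args, [])
  | ch :: rest, depth, args, cur =>
    if ch = '(' then pvLoopA rest (depth + 1) args (cur ++ [ch])
    else if ch = ')' then
      if depth - 1 = 0 then (args ++ [PySem.Chars.strip cur], rest)
      else pvLoopA rest (depth - 1) args (cur ++ [ch])
    else if ch = ',' ∧ depth = 1 then pvLoopA rest depth (args ++ [PySem.Chars.strip cur]) []
    else pvLoopA rest depth args (cur ++ [ch])

theorem pvLoopA_snd_le : ∀ (l : List Char) (d : Nat) (args : List (List Char)) (cur : List Char),
    (pvLoopA l d args cur).2.length ≤ l.length := by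
  intro l
  induction l with
  | nil => intro d args cur; simp [pvLoopA]
  | cons ch rest ih =>
    intro d args cur
    simp only [pvLoopA]
    split_ifs <;> simp <;> exact le_trans (ih _ _ _) (Nat.le_succ _)

-- outer while loop of A, on the remaining suffix of the input
def pvMainA : List Char → List Char
  | [] => []
  | c :: rest =>
    if PySem.Chars.startswith (c :: rest) "FRAC(".toList then
      let r := pvLoopA ((c :: rest).drop 5) 1 [] []
      (if r.1.length = 2 then
        "((".toList ++ r.1.getD 0 [] ++ ")/(".toList ++ r.1.getD 1 [] ++ "))".toList
      else
        "FRAC(".toList ++ PySem.Chars.join [','] r.1 ++ [')']) ++ pvMainA r.2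
    else c :: pvMainA rest
termination_by l => l.length
decreasing_by
  · have h := pvLoopA_snd_le ((c :: rest).drop 5) 1 [] []
    simp at h ⊢; omega
  · simp

def convert_frac_calls_py (s : String) : String := String.ofList (pvMainA s.toList)

-- ===== PORT B =====
-- _find_close of Source B: find the ')' closing the already-open group, tracking extra depth;
-- returns (text before it, text after it), or none if the string ends first
def pvFindClose : List Char → Nat → Option (List Char × List Char)
  | [], _ => none
  | c :: r, d =>
    if c = ')' then
      if d = 0 then some ([], r)
      else (pvFindClose r (d - 1)).map (fun p => (c :: p.1, p.2))
    else if c = '(' then (pvFindClose r (d + 1)).map (fun p => (c :: p.1, p.2))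
    else (pvFindClose r d).map (fun p => (c :: p.1, p.2))

theorem pvFindClose_some_len : ∀ (l : List Char) (d : Nat) (inner after : List Char),
    pvFindClose l d = some (inner, after) → after.length < l.length := by
  intro l
  induction l with
  | nil => intro d inner after h; simp [pvFindClose] at h
  | cons c r ih =>
    intro d inner after h
    simp only [pvFindClose] at h
    split_ifs at h with h1 h2 h3
    · simp at h; simp [← h.2]
    · rcases Option.map_eq_some_iff.mp h with ⟨⟨i', a'⟩, hfc, he⟩
      cases he; exact Nat.lt_succ_of_lt (ih _ _ _ hfc)
    · rcases Option.map_eq_some_iff.mp h with ⟨⟨i', a'⟩, hfc, he⟩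
      cases he; exact Nat.lt_succ_of_lt (ih _ _ _ hfc)
    · rcases Option.map_eq_some_iff.mp h with ⟨⟨i', a'⟩, hfc, he⟩
      cases he; exact Nat.lt_succ_of_lt (ih _ _ _ hfc)

-- prepend a character to the first piece of the split under construction
def pvConsHead (c : Char) : List (List Char) → List (List Char)
  | [] => [[c]]
  | p :: ps => (c :: p) :: ps

-- _split_top of Source B: split at top-level (depth-0) commas
def pvSplitTop : List Char → Nat → List (List Char)
  | [], _ => [[]]
  | c :: r, d =>
    if c = ',' ∧ d = 0 then [] :: pvSplitTop r 0
    else if c = '(' then pvConsHead c (pvSplitTop r (d + 1))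
    else if c = ')' then pvConsHead c (pvSplitTop r (d - 1))
    else pvConsHead c (pvSplitTop r d)

-- the two output formats of Source B's FRAC branch
def pvEmit (args : List (List Char)) : List Char :=
  if args.length = 2 then
    "((".toList ++ args.getD 0 [] ++ ")/(".toList ++ args.getD 1 [] ++ "))".toList
  else
    "FRAC(".toList ++ PySem.Chars.join [','] args ++ [')']

def pvMainB : List Char → List Char
  | [] => []
  | c :: rest =>
    if PySem.Chars.startswith (c :: rest) "FRAC(".toList then
      match hm : pvFindClose ((c :: rest).drop 5) 0 with
      | none => "FRAC(".toList ++ pvMainB ((c :: rest).drop 5)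
      | some (inner, after) =>
        pvEmit ((pvSplitTop inner 0).map PySem.Chars.strip) ++ pvMainB after
    else c :: pvMainB rest
termination_by l => l.length
decreasing_by
  · simp
  · have h := pvFindClose_some_len ((c :: rest).drop 5) 0 inner after hm
    simp at h ⊢; omega
  · simp

def convert_frac_calls_py_alt (s : String) : String := String.ofList (pvMainB s.toList)

-- ===== PRECONDITION & SPEC =====
-- single right-to-left pass deciding "some FRAC( has no matching close paren":
-- state = (seen such a FRAC(, unmatched-')' counts of the current suffix and of the
-- suffixes 1..4 chars further right, the last 4 characters consumed)
structure PvSt where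
  flag : Bool
  u0 : Nat
  u1 : Nat
  u2 : Nat
  u3 : Nat
  u4 : Nat
  c1 : Char
  c2 : Char
  c3 : Char
  c4 : Char
deriving Repr, DecidableEq

def pvInit : PvSt := ⟨false, 0, 0, 0, 0, 0, 'x', 'x', 'x', 'x'⟩

def pvStepSt (st : PvSt) (c : Char) : PvSt :=
  ⟨st.flag || (c == 'F' && st.c1 == 'R' && st.c2 == 'A' && st.c3 == 'C' && st.c4 == '(' && st.u4 == 0),
   (if c = ')' then st.u0 + 1 else if c = '(' then st.u0 - 1 else st.u0),
   st.u0, st.u1, st.u2, st.u3, c, st.c1, st.c2, st.c3⟩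

-- On inputs containing an occurrence of "FRAC(" with no matching close paren, A returns a
-- value that silently drops the unfinished argument text (and everything after the last
-- top-level comma), while B keeps the incomplete "FRAC(" and its following text literally,
-- which is the intended treatment of malformed input.
def D_convert_frac_calls_py (s : String) : Prop :=
  (s.toList.reverse.foldl pvStepSt pvInit).flag = true
instance (s : String) : Decidable (D_convert_frac_calls_py s) := by
  unfold D_convert_frac_calls_py; infer_instance

def Spec_convert_frac_calls_py (s : String) (out : String) : Prop :=
  ¬ D_convert_frac_calls_py s → out = convert_frac_calls_py_alt s
instance (s : String) (out : String) : Decidable (Spec_convert_frac_calls_py s out) := by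
  unfold Spec_convert_frac_calls_py; infer_instance

def pvDiffWitness_convert_frac_calls_py : String := "FRAC("
def pvDiffWitnessOut_convert_frac_calls_py : String × String := ("FRAC()", "FRAC(")

-- ===== CLAIM (what is proved, stated in full; the proofs are below) =====
def Claim_unchanged_convert_frac_calls_py : Prop :=
  ∀ (s : String), Dom_convert_frac_calls_py s → Spec_convert_frac_calls_py s (convert_frac_calls_py s)
def Claim_changed_convert_frac_calls_py : Prop :=
  Dom_convert_frac_calls_py (pvDiffWitness_convert_frac_calls_py) ∧
  D_convert_frac_calls_py (pvDiffWitness_convert_frac_calls_py) ∧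
  convert_frac_calls_py (pvDiffWitness_convert_frac_calls_py) = pvDiffWitnessOut_convert_frac_calls_py.1 ∧
  convert_frac_calls_py_alt (pvDiffWitness_convert_frac_calls_py) = pvDiffWitnessOut_convert_frac_calls_py.2 ∧
  pvDiffWitnessOut_convert_frac_calls_py.1 ≠ pvDiffWitnessOut_convert_frac_calls_py.2

-- ===== LEMMAS AND PROOFS =====

-- append `cur` to the front of the first piece (proof-side view of A's pending `cur`)
def pvConsFirst (cur : List Char) : List (List Char) → List (List Char)
  | [] => [cur]
  | p :: ps => (cur ++ p) :: ps

theorem pvConsFirst_consHead (cur : List Char) (c : Char) (X : List (List Char)) :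
    pvConsFirst cur (pvConsHead c X) = pvConsFirst (cur ++ [c]) X := by
  cases X <;> simp [pvConsFirst, pvConsHead]

theorem pvConsFirst_nil {X : List (List Char)} (h : X ≠ []) : pvConsFirst [] X = X := by
  cases X with
  | nil => exact absurd rfl h
  | cons p ps => simp [pvConsFirst]

theorem pvConsHead_ne_nil (c : Char) (X : List (List Char)) : pvConsHead c X ≠ [] := by
  cases X <;> simp [pvConsHead]

theorem pvSplitTop_ne_nil (l : List Char) (d : Nat) : pvSplitTop l d ≠ [] := by
  cases l with
  | nil => simp [pvSplitTop]
  | cons c r =>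
    simp only [pvSplitTop]
    split_ifs <;> simp [pvConsHead_ne_nil]

theorem pvLoop_some : ∀ (l : List Char) (d : Nat) (inner after : List Char)
    (args : List (List Char)) (cur : List Char),
    pvFindClose l d = some (inner, after) →
    pvLoopA l (d + 1) args cur =
      (args ++ (pvConsFirst cur (pvSplitTop inner d)).map PySem.Chars.strip, after) := by
  intro l
  induction l with
  | nil => intro d inner after args cur h; simp [pvFindClose] at h
  | cons c r ih =>
    intro d inner after args cur h
    simp only [pvFindClose] at h
    by_cases h1 : c = ')'
    · subst h1
      rw [if_pos rfl] at h
      by_cases h2 : d = 0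
      · subst h2
        rw [if_pos rfl] at h
        simp only [Option.some.injEq, Prod.mk.injEq] at h
        obtain ⟨hi, ha⟩ := h
        subst hi; subst ha
        simp [pvLoopA, pvSplitTop, pvConsFirst]
      · rw [if_neg h2] at h
        rcases Option.map_eq_some_iff.mp h with ⟨⟨i', a'⟩, hfc, he⟩
        simp only [Prod.mk.injEq] at he
        obtain ⟨hi, ha⟩ := he
        subst hi; subst ha
        obtain ⟨e, rfl⟩ : ∃ e, d = e + 1 := ⟨d - 1, (Nat.succ_pred_eq_of_pos (Nat.pos_of_ne_zero h2)).symm⟩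
        have : pvLoopA (')' :: r) (e + 1 + 1) args cur = pvLoopA r (e + 1) args (cur ++ [')']) := by
          simp [pvLoopA]
        rw [this, ih e i' a' args (cur ++ [')']) (by simpa using hfc)]
        simp [pvSplitTop, pvConsFirst_consHead]
    · by_cases h2 : c = '('
      · subst h2
        rw [if_neg (by decide), if_pos rfl] at h
        rcases Option.map_eq_some_iff.mp h with ⟨⟨i', a'⟩, hfc, he⟩
        simp only [Prod.mk.injEq] at he
        obtain ⟨hi, ha⟩ := he
        subst hi; subst ha
        have : pvLoopA ('(' :: r) (d + 1) args cur = pvLoopA r (d + 2) args (cur ++ ['(']) := by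
          simp [pvLoopA]
        rw [this, ih (d + 1) i' a' args (cur ++ ['(']) hfc]
        simp [pvSplitTop, pvConsFirst_consHead]
      · rw [if_neg h1, if_neg h2] at h
        rcases Option.map_eq_some_iff.mp h with ⟨⟨i', a'⟩, hfc, he⟩
        simp only [Prod.mk.injEq] at he
        obtain ⟨hi, ha⟩ := he
        subst hi; subst ha
        by_cases h3 : c = ',' ∧ d = 0
        · obtain ⟨rfl, rfl⟩ := h3
          have : pvLoopA (',' :: r) (0 + 1) args cur = pvLoopA r 1 (args ++ [PySem.Chars.strip cur]) [] := by
            simp [pvLoopA]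
          rw [this, ih 0 i' a' _ [] hfc]
          rw [pvConsFirst_nil (pvSplitTop_ne_nil i' 0)]
          simp [pvSplitTop, pvConsFirst]
        · have hd : ¬ (c = ',' ∧ d + 1 = 1) := by
            rintro ⟨hc, hdd⟩; exact h3 ⟨hc, by omega⟩
          have : pvLoopA (c :: r) (d + 1) args cur = pvLoopA r (d + 1) args (cur ++ [c]) := by
            simp only [pvLoopA]
            rw [if_neg h2, if_neg h1, if_neg hd]
          rw [this, ih d i' a' args (cur ++ [c]) hfc]
          have hst : pvSplitTop (c :: i') d = pvConsHead c (pvSplitTop i' d) := by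
            simp only [pvSplitTop]
            rw [if_neg h3, if_neg h2, if_neg h1]
          rw [hst, pvConsFirst_consHead]

-- unmatched-close count of a suffix, and the spec of the right-to-left scan
def pvU : List Char → Nat
  | [] => 0
  | c :: r => if c = ')' then pvU r + 1 else if c = '(' then pvU r - 1 else pvU r

def pvHasUnterm : List Char → Bool
  | [] => false
  | c :: r =>
    pvHasUnterm r ||
      (PySem.Chars.startswith (c :: r) "FRAC(".toList && (pvU ((c :: r).drop 5) == 0))

def pvStSpec (t : List Char) : PvSt :=
  ⟨pvHasUnterm t, pvU t, pvU (t.drop 1), pvU (t.drop 2), pvU (t.drop 3), pvU (t.drop 4),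
   t.getD 0 'x', t.getD 1 'x', t.getD 2 'x', t.getD 3 'x'⟩

theorem pvStartswith_cons (c : Char) (r : List Char) :
    PySem.Chars.startswith (c :: r) "FRAC(".toList =
      (c == 'F' && r.getD 0 'x' == 'R' && r.getD 1 'x' == 'A' && r.getD 2 'x' == 'C' &&
        r.getD 3 'x' == '(') := by
  rcases r with _ | ⟨a1, _ | ⟨a2, _ | ⟨a3, _ | ⟨a4, r⟩⟩⟩⟩ <;>
    · rw [Bool.eq_iff_iff, PySem.Chars.startswith_iff]
      show "FRAC(".toList <+: _ ↔ _
      simp [List.cons_prefix_cons, List.getD]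
      try decide
      try tauto

theorem pvScan_spec : ∀ (t : List Char), t.reverse.foldl pvStepSt pvInit = pvStSpec t := by
  intro t
  induction t with
  | nil => rfl
  | cons c r ih =>
    rw [List.reverse_cons, List.foldl_append, ih]
    show pvStepSt (pvStSpec r) c = pvStSpec (c :: r)
    unfold pvStepSt pvStSpec
    simp only [PvSt.mk.injEq]
    refine ⟨?_, by simp [pvU], rfl, rfl, rfl, rfl, rfl, rfl, rfl, rfl⟩
    simp only [pvHasUnterm, pvStartswith_cons, show (c :: r).drop 5 = r.drop 4 from rfl]

theorem pvHasUnterm_false : ∀ (l : List Char), pvHasUnterm l = false →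
    ∀ p, PySem.Chars.startswith (l.drop p) "FRAC(".toList = true →
      pvU (l.drop (p + 5)) ≠ 0 := by
  intro l
  induction l with
  | nil =>
    intro _ p hp
    rw [List.drop_nil] at hp
    exact absurd hp (by decide)
  | cons c r ih =>
    intro h p hp
    unfold pvHasUnterm at h
    rw [Bool.or_eq_false_iff] at h
    cases p with
    | zero =>
      rw [List.drop_zero] at hp
      have h2 := h.2
      rw [hp, Bool.true_and, beq_eq_false_iff_ne] at h2
      simpa using h2
    | succ p =>
      rw [List.drop_succ_cons] at hp
      have : (c :: r).drop (p + 1 + 5) = r.drop (p + 5) := by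
        rw [show p + 1 + 5 = (p + 5) + 1 from by omega, List.drop_succ_cons]
      rw [this]
      exact ih h.1 p hp

-- no matching close paren ⟹ the suffix has no unmatched ')' at the given depth
theorem pvFindClose_none_u : ∀ (l : List Char) (d : Nat),
    pvFindClose l d = none → pvU l ≤ d := by
  intro l
  induction l with
  | nil => intro d _; simp [pvU]
  | cons c r ih =>
    intro d h
    simp only [pvFindClose] at h
    unfold pvU
    by_cases h1 : c = ')'
    · subst h1
      rw [if_pos rfl] at h
      by_cases h2 : d = 0
      · rw [if_pos h2] at h; exact absurd h (by simp)
      · rw [if_neg h2] at h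
        have hfc : pvFindClose r (d - 1) = none := by
          cases hx : pvFindClose r (d - 1) <;> simp [hx] at h ⊢
        have := ih (d - 1) hfc
        rw [if_pos rfl]
        omega
    · by_cases h2 : c = '('
      · subst h2
        rw [if_neg (by decide), if_pos rfl] at h
        have hfc : pvFindClose r (d + 1) = none := by
          cases hx : pvFindClose r (d + 1) <;> simp [hx] at h ⊢
        have := ih (d + 1) hfc
        rw [if_neg (by decide), if_pos rfl]
        omega
      · rw [if_neg h1, if_neg h2] at h
        have hfc : pvFindClose r d = none := by
          cases hx : pvFindClose r d <;> simp [hx] at h ⊢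
        rw [if_neg h1, if_neg h2]
        exact ih d hfc

theorem pvFindClose_some_drop : ∀ (l : List Char) (d : Nat) (inner after : List Char),
    pvFindClose l d = some (inner, after) → ∃ m, after = l.drop m := by
  intro l
  induction l with
  | nil => intro d inner after h; simp [pvFindClose] at h
  | cons c r ih =>
    intro d inner after h
    simp only [pvFindClose] at h
    split_ifs at h with h1 h2 h3
    · simp at h
      exact ⟨1, by simp [← h.2]⟩
    · rcases Option.map_eq_some_iff.mp h with ⟨⟨i', a'⟩, hfc, he⟩
      cases he
      obtain ⟨m, hm⟩ := ih _ _ _ hfc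
      exact ⟨m + 1, by simp [hm]⟩
    · rcases Option.map_eq_some_iff.mp h with ⟨⟨i', a'⟩, hfc, he⟩
      cases he
      obtain ⟨m, hm⟩ := ih _ _ _ hfc
      exact ⟨m + 1, by simp [hm]⟩
    · rcases Option.map_eq_some_iff.mp h with ⟨⟨i', a'⟩, hfc, he⟩
      cases he
      obtain ⟨m, hm⟩ := ih _ _ _ hfc
      exact ⟨m + 1, by simp [hm]⟩

-- "every FRAC( occurrence in l has a matching close paren"
def pvGood (l : List Char) : Prop :=
  ∀ p, PySem.Chars.startswith (l.drop p) "FRAC(".toList = true →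
    pvFindClose (l.drop (p + 5)) 0 ≠ none

theorem pvGood_tail {c : Char} {rest : List Char} (h : pvGood (c :: rest)) : pvGood rest := by
  intro p hp
  have := h (p + 1)
  simp only [List.drop_succ_cons] at this
  exact this hp

theorem pvGood_drop {l : List Char} (h : pvGood l) (m : Nat) : pvGood (l.drop m) := by
  intro p hp
  rw [List.drop_drop] at hp ⊢
  rw [show m + (p + 5) = m + p + 5 from by omega]
  exact h (m + p) hp

theorem pvMain_eq : ∀ (n : Nat) (l : List Char), l.length ≤ n → pvGood l → pvMainA l = pvMainB l := by
  intro n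
  induction n with
  | zero =>
    intro l hl _
    have : l = [] := List.eq_nil_of_length_eq_zero (Nat.le_zero.mp hl)
    subst this; simp [pvMainA, pvMainB]
  | succ n ih =>
    intro l hl hg
    cases l with
    | nil => simp [pvMainA, pvMainB]
    | cons c rest =>
      by_cases hp : PySem.Chars.startswith (c :: rest) "FRAC(".toList = true
      · rw [pvMainA, pvMainB, if_pos hp, if_pos hp]
        cases hm : pvFindClose ((c :: rest).drop 5) 0 with
        | none =>
          exact absurd hm (by simpa using hg 0 (by simpa using hp))
        | some p =>
          obtain ⟨inner, after⟩ := p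
          rw [pvLoop_some ((c :: rest).drop 5) 0 inner after [] [] hm]
          rw [pvConsFirst_nil (pvSplitTop_ne_nil inner 0)]
          simp only [List.nil_append]
          have hlen : after.length ≤ n := by
            have := pvFindClose_some_len ((c :: rest).drop 5) 0 inner after hm
            simp at this hl; omega
          obtain ⟨m, hmd⟩ := pvFindClose_some_drop ((c :: rest).drop 5) 0 inner after hm
          have hga : pvGood after := by
            rw [hmd, List.drop_drop]
            exact pvGood_drop hg (5 + m)
          rw [ih after hlen hga]
          simp [pvEmit]
      · rw [pvMainA, pvMainB, if_neg hp, if_neg hp]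
        exact congrArg _ (ih rest (by simp at hl; omega) (pvGood_tail hg))

theorem pvNotD_good (s : String) (h : ¬ D_convert_frac_calls_py s) : pvGood s.toList := by
  intro p hp hnone
  unfold D_convert_frac_calls_py at h
  rw [pvScan_spec] at h
  have hflag : pvHasUnterm s.toList = false := by
    cases hx : pvHasUnterm s.toList
    · rfl
    · exact absurd hx h
  exact pvHasUnterm_false s.toList hflag p hp
    (Nat.le_zero.mp (pvFindClose_none_u _ 0 hnone))

-- ===== VERDICT (by name: the statements are the Claim_ definitions above) =====
theorem convert_frac_calls_py_spec : Claim_unchanged_convert_frac_calls_py := by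
  intro s _ hD
  unfold convert_frac_calls_py convert_frac_calls_py_alt
  exact congrArg String.ofList
    (pvMain_eq s.toList.length s.toList (Nat.le_refl _) (pvNotD_good s hD))

theorem convert_frac_calls_py_changed : Claim_changed_convert_frac_calls_py := by
  unfold Claim_changed_convert_frac_calls_py
  refine ⟨by decide, by decide, ?_, ?_, by decide⟩
  · show convert_frac_calls_py "FRAC(" = "FRAC()"
    simp [convert_frac_calls_py, pvMainA, pvLoopA, PySem.Chars.join, String.ofList]
    decide
  · show convert_frac_calls_py_alt "FRAC(" = "FRAC("
    simp [convert_frac_calls_py_alt, pvMainB, pvFindClose, String.ofList]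
    decide
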